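-- pv_equiv track=rewrite | github.com/a-code-wall/python-quickstart-samples | ch8/practice.py | make_great_1
-- ===== SOURCE A (Python) =====
-- def make_great_1(magicians):
-- 	great_magicians = []
-- 	while magicians:
-- 		magician = magicians.pop()
-- 		great_magicians.append("the Great " + magician)
-- 	while great_magicians:
-- 		magicians.append(great_magicians.pop())
-- 	return magicians
-- ===== SOURCE B (Python) =====
-- def make_great_1(magicians):
--     magicians[:] = ["the Great " + m for m in magicians]
--     return magicians
-- ===== Notes on version B (the rewrite author's own statement) =====
-- stated objective: simpler
-- what changed: A empties the list by popping from the end into a scratch list and then pops everything back; B rewrites the list contents in one slice assignment, keeping the same list object and mutation behaviour without the two pop loops or the scratch list.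
import Mathlib
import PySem

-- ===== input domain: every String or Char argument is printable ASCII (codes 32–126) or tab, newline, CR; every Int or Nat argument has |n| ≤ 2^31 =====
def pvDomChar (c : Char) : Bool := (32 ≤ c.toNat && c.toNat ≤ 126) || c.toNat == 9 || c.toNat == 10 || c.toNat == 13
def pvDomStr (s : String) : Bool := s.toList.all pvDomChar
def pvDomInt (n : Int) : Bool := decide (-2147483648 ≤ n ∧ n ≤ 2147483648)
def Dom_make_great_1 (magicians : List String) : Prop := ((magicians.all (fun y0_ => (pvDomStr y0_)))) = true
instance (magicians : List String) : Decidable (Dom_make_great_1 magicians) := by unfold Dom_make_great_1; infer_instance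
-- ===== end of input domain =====

-- B replaces A's two pop loops and scratch list by a single in-place rewrite of the
-- list contents (slice assignment with a comprehension); equivalence is about the
-- return value (both Pythons mutate the argument to the same final contents).

-- ===== PORT A =====
-- first while loop: pop from the end of `ms` into `gs` with the prefix attached
def mg1Loop1 (ms gs : List String) : List String :=
  if h : ms = [] then gs
  else mg1Loop1 ms.dropLast (gs ++ ["the Great " ++ ms.getLast h])
termination_by ms.length
decreasing_by
  have hp : 0 < ms.length := List.length_pos_iff.mpr h
  simp [List.length_dropLast]
  omega

-- second while loop: pop from the end of `gs` back into `ms`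
def mg1Loop2 (gs ms : List String) : List String :=
  if h : gs = [] then ms
  else mg1Loop2 gs.dropLast (ms ++ [gs.getLast h])
termination_by gs.length
decreasing_by
  have hp : 0 < gs.length := List.length_pos_iff.mpr h
  simp [List.length_dropLast]
  omega

def make_great_1 (magicians : List String) : List String :=
  let great_magicians := mg1Loop1 magicians []
  mg1Loop2 great_magicians []

-- ===== PORT B =====
def make_great_1_alt (magicians : List String) : List String :=
  magicians.map (fun m => "the Great " ++ m)

-- ===== PRECONDITION & SPEC =====
def Spec_make_great_1 (magicians : List String) (out : List String) : Prop := out = make_great_1_alt magicians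
instance (magicians : List String) (out : List String) : Decidable (Spec_make_great_1 magicians out) := by unfold Spec_make_great_1; infer_instance

-- ===== CLAIM (what is proved, stated in full; the proofs are below) =====
def Claim_equal_make_great_1 : Prop := ∀ (magicians : List String), Dom_make_great_1 magicians → Spec_make_great_1 magicians (make_great_1 magicians)

-- ===== LEMMAS AND PROOFS =====
theorem mg1Loop1_eq (ms gs : List String) :
    mg1Loop1 ms gs = gs ++ (ms.reverse.map (fun m => "the Great " ++ m)) := by
  induction ms using List.reverseRecOn generalizing gs with
  | nil => simp [mg1Loop1]
  | append_singleton l a ih =>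
      rw [mg1Loop1]
      simp [ih]

theorem mg1Loop2_eq (gs ms : List String) :
    mg1Loop2 gs ms = ms ++ gs.reverse := by
  induction gs using List.reverseRecOn generalizing ms with
  | nil => simp [mg1Loop2]
  | append_singleton l a ih =>
      rw [mg1Loop2]
      simp [ih]

-- ===== VERDICT (by name: the statement is the Claim_ definition above) =====
theorem make_great_1_spec : Claim_equal_make_great_1 := by
  intro magicians _
  unfold Spec_make_great_1 make_great_1 make_great_1_alt
  simp [mg1Loop1_eq, mg1Loop2_eq]
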